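-- pv_equiv track=rewrite | github.com/satishvemireddy/PP_LAB | Wise_project/Vertices.py | RowCol
-- ===== SOURCE A (Python) =====
-- def RowCol(p):
--     row = cnt = 0
--     while True:
--         row+=1
--         for col in range(row):
--             cnt+=1
--             if cnt == p:
--                 return row, col+1
-- ===== SOURCE B (Python) =====
-- def RowCol(p):
--     # Binary search for the smallest row r with r*(r+1)//2 >= p, then col directly.
--     lo, hi = 1, p
--     while lo < hi:
--         mid = (lo + hi) // 2
--         if mid * (mid + 1) // 2 >= p:
--             hi = mid
--         else:
--             lo = mid + 1
--     return lo, p - lo * (lo - 1) // 2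
-- ===== Notes on version B (the rewrite author's own statement) =====
-- stated objective: faster
-- what changed: Replaces the element-by-element walk over the triangle with a binary search inverting the triangular-number formula: row is the least r with r(r+1)/2 >= p, col = p - r(r-1)/2.
-- outside the precondition, e.g. on RowCol(0): A does not finish within the time limit, B returns (1, 0)
import Mathlib
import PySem

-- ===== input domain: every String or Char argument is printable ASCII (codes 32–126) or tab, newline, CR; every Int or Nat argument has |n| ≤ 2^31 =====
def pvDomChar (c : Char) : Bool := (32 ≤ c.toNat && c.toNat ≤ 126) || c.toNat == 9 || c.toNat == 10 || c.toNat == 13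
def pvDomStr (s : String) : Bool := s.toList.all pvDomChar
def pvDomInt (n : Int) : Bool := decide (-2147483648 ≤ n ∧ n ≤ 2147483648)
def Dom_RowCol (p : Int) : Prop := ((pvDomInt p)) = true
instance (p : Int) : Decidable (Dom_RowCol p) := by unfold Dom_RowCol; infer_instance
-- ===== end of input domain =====

-- B replaces A's element-by-element walk over the triangle by a binary search inverting the
-- triangular-number formula (objective: faster).

-- ===== PORT A =====
-- 'for col in range(row): cnt+=1; if cnt==p: return row,col+1' — returns (some result, final cnt) or (none, final cnt)
def RowColA_inner (row p : Int) : List Int → Int → Option (List Int) × Int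
  | [], cnt => (none, cnt)
  | col :: cs, cnt =>
      let cnt := cnt + 1
      if cnt = p then (some [row, col + 1], cnt) else RowColA_inner row p cs cnt

-- the 'while True' loop; fuel p.toNat only makes the loop total (cnt grows by row ≥ 1 each pass,
-- so inside Pre_ the fuel is never exhausted)
def RowColA_outer (p : Int) : Nat → Int → Int → List Int
  | 0, _, _ => []
  | Nat.succ f, row, cnt =>
      let row := row + 1
      match RowColA_inner row p (PySem.List.pyRange 0 row 1) cnt with
      | (some r, _) => r
      | (none, cnt') => RowColA_outer p f row cnt'

def RowCol (p : Int) : List Int := RowColA_outer p p.toNat 0 0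

-- ===== PORT B =====
-- binary search: smallest r with r*(r+1)//2 >= p; recursion on (hi-lo).toNat (Python's 'while lo < hi')
def RowColB_loop (p lo hi : Int) : Int :=
  if h : lo < hi then
    let mid := PySem.Int.floordiv (lo + hi) 2
    if PySem.Int.floordiv (mid * (mid + 1)) 2 ≥ p then
      RowColB_loop p lo mid
    else
      RowColB_loop p (mid + 1) hi
  else lo
termination_by (hi - lo).toNat
decreasing_by
  · have h1 : PySem.Int.floordiv (lo + hi) 2 < hi :=
      (PySem.Int.floordiv_lt_iff_lt_mul (by norm_num)).mpr (by omega)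
    omega
  · have h1 : PySem.Int.floordiv (lo + hi) 2 < hi :=
      (PySem.Int.floordiv_lt_iff_lt_mul (by norm_num)).mpr (by omega)
    have h2 : lo ≤ PySem.Int.floordiv (lo + hi) 2 :=
      (PySem.Int.le_floordiv_iff_mul_le (by norm_num)).mpr (by omega)
    omega

def RowCol_alt (p : Int) : List Int :=
  let lo := RowColB_loop p 1 p
  [lo, p - PySem.Int.floordiv (lo * (lo - 1)) 2]

-- ===== PRECONDITION & SPEC =====
-- A loops forever for p ≤ 0 (its counter only counts upward from 1), so those inputs are excluded.
def Pre_RowCol (p : Int) : Prop := 1 ≤ p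
instance (p : Int) : Decidable (Pre_RowCol p) := by unfold Pre_RowCol; infer_instance
def pvWitness_RowCol : Int := (7)

def Spec_RowCol (p : Int) (out : List Int) : Prop := out = RowCol_alt p
instance (p : Int) (out : List Int) : Decidable (Spec_RowCol p out) := by unfold Spec_RowCol; infer_instance

-- ===== CLAIM (what is proved, stated in full; the proofs are below) =====
def Claim_equal_RowCol : Prop := ∀ (p : Int), Dom_RowCol p → Pre_RowCol p → Spec_RowCol p (RowCol p)

-- ===== LEMMAS AND PROOFS =====

-- both programs return [r, c] with 1 ≤ c ≤ r and p = r(r-1)/2 + c; such (r, c) is unique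
def RowColOK (p r c : Int) : Prop := 1 ≤ c ∧ c ≤ r ∧ 2 * p = r * (r - 1) + 2 * c

theorem RowColOK_unique {p r c r' c' : Int} (h : RowColOK p r c) (h' : RowColOK p r' c') :
    r = r' ∧ c = c' := by
  obtain ⟨h1, h2, h3⟩ := h
  obtain ⟨h1', h2', h3'⟩ := h'
  have hr : r = r' := by
    rcases lt_trichotomy r r' with hlt | he | hgt
    · exfalso; nlinarith
    · exact he
    · exfalso; nlinarith
  subst hr
  constructor
  · rfl
  · nlinarith

theorem RowColA_inner_spec (row p : Int) : ∀ (n : Nat) (a cnt : Int), row = a + n → 0 ≤ a →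
    RowColA_inner row p (PySem.List.pyRange a row 1) cnt =
      if cnt < p ∧ p ≤ cnt + (row - a) then (some [row, a + (p - cnt)], p)
      else (none, cnt + (row - a)) := by
  intro n
  induction n with
  | zero =>
      intro a cnt hn _
      have hn' : row = a := by push_cast at hn; omega
      rw [PySem.List.pyRange_one_eq_nil (by omega)]
      simp only [RowColA_inner]
      rw [if_neg (by omega)]
      have h1 : cnt + (row - a) = cnt := by omega
      rw [h1]
  | succ m ih =>
      intro a cnt hn ha
      have hn' : row = a + (m : Int) + 1 := by push_cast at hn; omega
      rw [PySem.List.pyRange_one_cons (by omega)]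
      simp only [RowColA_inner]
      by_cases hc : cnt + 1 = p
      · rw [if_pos hc, if_pos (by omega)]
        have h1 : a + (p - cnt) = a + 1 := by omega
        rw [h1, hc]
      · rw [if_neg hc, ih (a + 1) (cnt + 1) (by omega) (by omega)]
        by_cases hd : cnt < p ∧ p ≤ cnt + (row - a)
        · rw [if_pos (by omega), if_pos hd]
          have h1 : a + 1 + (p - (cnt + 1)) = a + (p - cnt) := by omega
          rw [h1]
        · rw [if_neg (by omega), if_neg hd]
          have h1 : cnt + 1 + (row - (a + 1)) = cnt + (row - a) := by omega
          rw [h1]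

theorem RowColA_outer_spec (p : Int) : ∀ fuel (row cnt : Int), 0 ≤ row →
    2 * cnt = row * (row + 1) → cnt < p → (p - cnt).toNat ≤ fuel →
    ∃ r c, RowColA_outer p fuel row cnt = [r, c] ∧ RowColOK p r c := by
  intro fuel
  induction fuel with
  | zero => intro row cnt _ _ hlt hf; exfalso; omega
  | succ f ih =>
      intro row cnt hrow hinv hlt hf
      simp only [RowColA_outer]
      rw [RowColA_inner_spec (row + 1) p (row + 1).toNat 0 cnt (by omega) le_rfl]
      by_cases hc : cnt < p ∧ p ≤ cnt + (row + 1 - 0)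
      · rw [if_pos hc]
        refine ⟨row + 1, 0 + (p - cnt), rfl, by omega, by omega, ?_⟩
        have hr : (row + 1) * (row + 1 - 1) = row * (row + 1) := by ring
        rw [hr]
        omega
      · rw [if_neg hc]
        have hinv' : 2 * (cnt + (row + 1 - 0)) = (row + 1) * ((row + 1) + 1) := by
          have : (row + 1) * ((row + 1) + 1) = row * (row + 1) + 2 * (row + 1) := by ring
          omega
        exact ih (row + 1) (cnt + (row + 1 - 0)) (by omega) hinv' (by omega) (by omega)

-- the product n*(n+1) is even, so Python's '// 2' on it is exact
theorem half_mul_succ (n : Int) : 2 * PySem.Int.floordiv (n * (n + 1)) 2 = n * (n + 1) := by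
  rw [PySem.Int.floordiv_eq_ediv_of_pos (by norm_num)]
  have h : (2 : Int) ∣ n * (n + 1) := (Int.even_mul_succ_self n).two_dvd
  rw [mul_comm]
  exact Int.ediv_mul_cancel h

theorem RowColB_loop_spec (p : Int) : ∀ n (lo hi : Int), (hi - lo).toNat = n →
    1 ≤ lo → lo ≤ hi → (lo - 1) * lo < 2 * p → 2 * p ≤ hi * (hi + 1) →
    lo ≤ RowColB_loop p lo hi ∧ RowColB_loop p lo hi ≤ hi ∧
      (RowColB_loop p lo hi - 1) * RowColB_loop p lo hi < 2 * p ∧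
      2 * p ≤ RowColB_loop p lo hi * (RowColB_loop p lo hi + 1) := by
  intro n
  induction n using Nat.strong_induction_on with
  | _ n ih =>
      intro lo hi hn hlo hle hfail hok
      rw [RowColB_loop]
      by_cases h : lo < hi
      · rw [dif_pos h]
        have hmid1 : PySem.Int.floordiv (lo + hi) 2 < hi :=
          (PySem.Int.floordiv_lt_iff_lt_mul (by norm_num)).mpr (by omega)
        have hmid2 : lo ≤ PySem.Int.floordiv (lo + hi) 2 :=
          (PySem.Int.le_floordiv_iff_mul_le (by norm_num)).mpr (by omega)
        set mid := PySem.Int.floordiv (lo + hi) 2 with hmid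
        have hhalf := half_mul_succ mid
        by_cases ht : PySem.Int.floordiv (mid * (mid + 1)) 2 ≥ p
        · rw [if_pos ht]
          exact (ih (mid - lo).toNat (by omega) lo mid rfl hlo (by omega) hfail
            (by omega)).imp id (fun ⟨a, b, c⟩ => ⟨by omega, b, c⟩)
        · rw [if_neg ht]
          have hfail' : (mid + 1 - 1) * (mid + 1) < 2 * p := by
            have he : (mid + 1 - 1) * (mid + 1) = mid * (mid + 1) := by ring
            omega
          exact (ih (hi - (mid + 1)).toNat (by omega) (mid + 1) hi rfl (by omega)
            (by omega) hfail' hok).imp (fun a => by omega) id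
      · rw [dif_neg h]
        have : lo = hi := by omega
        subst this
        exact ⟨le_rfl, le_rfl, by omega, hok⟩

-- ===== VERDICT (by name: the statement is the Claim_ definition above) =====
theorem RowCol_spec : Claim_equal_RowCol := by
  intro p _ hp
  have hp1 : 1 ≤ p := hp
  -- characterize A
  obtain ⟨r, c, hA, hAok⟩ := RowColA_outer_spec p p.toNat 0 0 le_rfl (by ring) (by omega)
    (by omega)
  -- characterize B
  have hB := RowColB_loop_spec p (p - 1).toNat 1 p rfl le_rfl hp1 (by omega) (by nlinarith)
  obtain ⟨hlo, hhi, hfail, hok⟩ := hB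
  set r' := RowColB_loop p 1 p with hr'
  have hhalf : 2 * PySem.Int.floordiv (r' * (r' - 1)) 2 = r' * (r' - 1) := by
    have := half_mul_succ (r' - 1)
    have he : (r' - 1) * ((r' - 1) + 1) = r' * (r' - 1) := by ring
    rw [he] at this
    exact this
  have hcomm : (r' - 1) * r' = r' * (r' - 1) := by ring
  have hexp : r' * (r' + 1) = r' * (r' - 1) + 2 * r' := by ring
  have hBok : RowColOK p r' (p - PySem.Int.floordiv (r' * (r' - 1)) 2) :=
    ⟨by omega, by omega, by omega⟩
  obtain ⟨hr, hc⟩ := RowColOK_unique hAok hBok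
  show RowColA_outer p p.toNat 0 0 = RowCol_alt p
  rw [hA]
  show ([r, c] : List Int) = [r', p - PySem.Int.floordiv (r' * (r' - 1)) 2]
  rw [hr, hc]
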